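-- pv_equiv track=rewrite | github.com/nguptaa183/Blind75 | try.py | count_investable_periods
-- ===== SOURCE A (Python) =====
-- def count_investable_periods(n, price, max_price, min_price):
--     count = 0
--     for i in range(n):
--         subarray_max = float('-inf')
--         subarray_min = float('inf')
--
--         for j in range(i, n):
--             subarray_max = max(subarray_max, price[j])
--             subarray_min = min(subarray_min, price[j])
--
--             if subarray_max == max_price and subarray_min == min_price:
--                 count += 1
--
--     return count
-- ===== SOURCE B (Python) =====
-- def count_investable_periods(n, price, max_price, min_price):
--     # Inclusion-exclusion over "all elements in [lo, hi]" run counts: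
--     # subarrays with max == max_price and min == min_price
--     #   = f(m, M) - f(m+1, M) - f(m, M-1) + f(m+1, M-1)
--     def f(lo, hi):
--         total = 0
--         run = 0
--         for j in range(n):
--             run = run + 1 if lo <= price[j] <= hi else 0
--             total += run
--         return total
--     return (f(min_price, max_price)
--             - f(min_price + 1, max_price)
--             - f(min_price, max_price - 1)
--             + f(min_price + 1, max_price - 1))
-- ===== Notes on version B (the rewrite author's own statement) =====
-- stated objective: faster
-- what changed: Replaces the O(n^2) scan over all start indices with four O(n) run-length passes counting subarrays whose elements all lie in [lo,hi], combined by inclusion-exclusion to get subarrays with max == max_price and min == min_price.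
import Mathlib
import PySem

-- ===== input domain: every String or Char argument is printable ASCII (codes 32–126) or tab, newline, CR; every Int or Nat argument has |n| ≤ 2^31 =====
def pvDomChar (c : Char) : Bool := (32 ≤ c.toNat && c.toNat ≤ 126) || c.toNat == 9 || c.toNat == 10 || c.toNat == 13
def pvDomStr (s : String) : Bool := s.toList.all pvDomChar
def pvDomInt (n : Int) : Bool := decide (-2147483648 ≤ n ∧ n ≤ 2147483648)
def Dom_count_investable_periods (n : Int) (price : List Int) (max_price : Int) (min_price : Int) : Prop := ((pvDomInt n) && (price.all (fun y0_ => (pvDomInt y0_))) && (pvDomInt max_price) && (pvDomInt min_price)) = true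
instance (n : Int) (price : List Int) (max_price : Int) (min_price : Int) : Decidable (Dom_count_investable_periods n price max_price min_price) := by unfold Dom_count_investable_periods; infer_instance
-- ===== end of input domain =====

-- B replaces A's O(n^2) double loop by four linear run-length passes combined by inclusion-exclusion (objective: faster).

-- ===== PORT A =====
-- Python's float('-inf')/float('inf') sentinels are modelled by `none` (exact: they are
-- replaced by price[i] at the first inner iteration and never compared equal to an int).
def pvStepA (max_price min_price : Int) (st : Option Int × Option Int × Int) (v : Int) :
    Option Int × Option Int × Int :=
  let mx : Int := match st.1 with | none => v | some x => max x v
  let mn : Int := match st.2.1 with | none => v | some x => min x v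
  (some mx, some mn, if mx = max_price ∧ mn = min_price then st.2.2 + 1 else st.2.2)

def count_investable_periods (n : Int) (price : List Int) (max_price : Int) (min_price : Int) : Int :=
  (PySem.List.pyRange 0 n 1).foldl (fun count i =>
    ((PySem.List.pyRange i n 1).foldl
        (fun st j => pvStepA max_price min_price st (PySem.List.pyGetD price j 0))
        ((none, none, count) : Option Int × Option Int × Int)).2.2) 0

-- ===== PORT B =====
-- state (total, run)
def pvStepRun (lo hi : Int) (st : Int × Int) (v : Int) : Int × Int :=
  let run : Int := if lo ≤ v ∧ v ≤ hi then st.2 + 1 else 0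
  (st.1 + run, run)

def pvRunCount (n : Int) (price : List Int) (lo hi : Int) : Int :=
  ((PySem.List.pyRange 0 n 1).foldl
      (fun st j => pvStepRun lo hi st (PySem.List.pyGetD price j 0))
      ((0, 0) : Int × Int)).1

def count_investable_periods_alt (n : Int) (price : List Int) (max_price : Int) (min_price : Int) : Int :=
  pvRunCount n price min_price max_price
    - pvRunCount n price (min_price + 1) max_price
    - pvRunCount n price min_price (max_price - 1)
    + pvRunCount n price (min_price + 1) (max_price - 1)

-- ===== PRECONDITION & SPEC =====
-- A raises IndexError iff n > len(price) (both programs index price[j] for j < n); nothing else is excluded.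
def Pre_count_investable_periods (n : Int) (price : List Int) (max_price : Int) (min_price : Int) : Prop :=
  n ≤ (price.length : Int)
instance (n : Int) (price : List Int) (max_price : Int) (min_price : Int) : Decidable (Pre_count_investable_periods n price max_price min_price) := by unfold Pre_count_investable_periods; infer_instance

def pvWitness_count_investable_periods : Int × List Int × Int × Int := (4, [1, 3, 2, 3], 3, 1)

def Spec_count_investable_periods (n : Int) (price : List Int) (max_price : Int) (min_price : Int) (out : Int) : Prop := out = count_investable_periods_alt n price max_price min_price
instance (n : Int) (price : List Int) (max_price : Int) (min_price : Int) (out : Int) : Decidable (Spec_count_investable_periods n price max_price min_price out) := by unfold Spec_count_investable_periods; infer_instance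

-- ===== CLAIM (what is proved, stated in full; the proofs are below) =====
def Claim_equal_count_investable_periods : Prop := ∀ (n : Int) (price : List Int) (max_price : Int) (min_price : Int), Dom_count_investable_periods n price max_price min_price → Pre_count_investable_periods n price max_price min_price → Spec_count_investable_periods n price max_price min_price (count_investable_periods n price max_price min_price)

-- ===== LEMMAS AND PROOFS =====

-- (int-valued) length of the maximal prefix with all elements in [lo, hi]
def pvTW (lo hi : Int) : List Int → Int
  | [] => 0
  | x :: xs => if lo ≤ x ∧ x ≤ hi then pvTW lo hi xs + 1 else 0

-- count increment of A's inner loop started in state (omx, omn)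
def pvHc (M m : Int) : Option Int → Option Int → List Int → Int
  | _, _, [] => 0
  | omx, omn, x :: xs =>
    let mx : Int := match omx with | none => x | some a => max a x
    let mn : Int := match omn with | none => x | some b => min b x
    (if mx = M ∧ mn = m then 1 else 0) + pvHc M m (some mx) (some mn) xs

-- total increment of B's run loop started with incoming run r
def pvG (lo hi : Int) : Int → List Int → Int
  | _, [] => 0
  | r, x :: xs =>
    let r' : Int := if lo ≤ x ∧ x ≤ hi then r + 1 else 0
    r' + pvG lo hi r' xs

-- per-component counter sharing A's running-state update (one term of the inclusion-exclusion)
def pvJ (lo hi : Int) : Int → Int → List Int → Int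
  | _, _, [] => 0
  | a, b, x :: xs =>
    (if lo ≤ min b x ∧ max a x ≤ hi then 1 else 0) + pvJ lo hi (max a x) (min b x) xs

-- sum of h over all nonempty suffixes
def pvSD (h : List Int → Int) : List Int → Int
  | [] => 0
  | x :: xs => h (x :: xs) + pvSD h xs

-- index fold over range(i, n) of price = list fold over (take n price).drop i
theorem pv_bridge {σ : Type} (f : σ → Int → σ) (price : List Int) (d : Int) :
    ∀ (k : Nat) (i n : Int) (s : σ), 0 ≤ i → n - i = (k : Int) → n ≤ (price.length : Int) →
    (PySem.List.pyRange i n 1).foldl (fun acc j => f acc (PySem.List.pyGetD price j d)) s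
      = ((price.take n.toNat).drop i.toNat).foldl f s := by
  intro k
  induction k with
  | zero =>
    intro i n s hi hk hn
    rw [PySem.List.pyRange_one_eq_nil (by omega)]
    have : (price.take n.toNat).length ≤ i.toNat := by
      simp [List.length_take]; omega
    rw [List.drop_eq_nil_of_le this]
    rfl
  | succ k ih =>
    intro i n s hi hk hn
    have hilt : i < n := by omega
    have hlen : i.toNat < (price.take n.toNat).length := by
      simp [List.length_take]; omega
    have hlenp : i.toNat < price.length := by omega
    rw [PySem.List.pyRange_one_cons hilt, List.foldl_cons,
        List.drop_eq_getElem_cons hlen, List.foldl_cons]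
    have hget : PySem.List.pyGetD price i d = (price.take n.toNat)[i.toNat] := by
      rw [PySem.List.pyGetD_eq_getElem price d hi (by omega)]
      simp
    rw [hget]
    have h1 : (i + 1).toNat = i.toNat + 1 := by omega
    rw [← h1]
    exact ih (i + 1) n _ (by omega) (by omega) hn

-- A's inner loop computes pvHc
theorem pv_inner_char (M m : Int) :
    ∀ (s : List Int) (omx omn : Option Int) (c : Int),
    (s.foldl (pvStepA M m) (omx, omn, c)).2.2 = c + pvHc M m omx omn s := by
  intro s
  induction s with
  | nil => intro omx omn c; simp [pvHc]
  | cons x xs ih =>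
    intro omx omn c
    rw [List.foldl_cons]
    show (xs.foldl (pvStepA M m) (pvStepA M m (omx, omn, c) x)).2.2 = _
    simp only [pvStepA, pvHc]
    rw [ih]
    split_ifs <;> ring

-- B's loop computes pvG
theorem pv_run_char (lo hi : Int) :
    ∀ (s : List Int) (t r : Int),
    (s.foldl (pvStepRun lo hi) (t, r)).1 = t + pvG lo hi r s := by
  intro s
  induction s with
  | nil => intro t r; simp [pvG]
  | cons x xs ih =>
    intro t r
    rw [List.foldl_cons]
    show (xs.foldl (pvStepRun lo hi) (pvStepRun lo hi (t, r) x)).1 = _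
    simp only [pvStepRun, pvG]
    rw [ih]
    split_ifs <;> ring

theorem pvG_shift (lo hi : Int) :
    ∀ (s : List Int) (r : Int), pvG lo hi r s = pvG lo hi 0 s + r * pvTW lo hi s := by
  intro s
  induction s with
  | nil => intro r; simp [pvG, pvTW]
  | cons x xs ih =>
    intro r
    simp only [pvG, pvTW]
    split_ifs with h
    · rw [ih (r + 1), ih (0 + 1)]; ring
    · simp

theorem pvG_zero (lo hi : Int) :
    ∀ (s : List Int), pvG lo hi 0 s = pvSD (pvTW lo hi) s := by
  intro s
  induction s with
  | nil => simp [pvG, pvSD]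
  | cons x xs ih =>
    simp only [pvG, pvSD, pvTW]
    split_ifs with h
    · rw [pvG_shift lo hi xs (0 + 1), ih]; ring
    · simpa [pvG] using ih

theorem pvJ_eq (lo hi : Int) :
    ∀ (s : List Int) (a b : Int),
    pvJ lo hi a b s = (if lo ≤ b ∧ a ≤ hi then 1 else 0) * pvTW lo hi s := by
  intro s
  induction s with
  | nil => intro a b; simp [pvJ, pvTW]
  | cons x xs ih =>
    intro a b
    simp only [pvJ, pvTW]
    rw [ih]
    split_ifs <;> omega

theorem pvHc_J (M m : Int) :
    ∀ (s : List Int) (a b : Int),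
    pvHc M m (some a) (some b) s =
      pvJ m M a b s - pvJ (m + 1) M a b s - pvJ m (M - 1) a b s
        + pvJ (m + 1) (M - 1) a b s := by
  intro s
  induction s with
  | nil => intro a b; simp [pvHc, pvJ]
  | cons x xs ih =>
    intro a b
    simp only [pvHc, pvJ]
    rw [ih]
    split_ifs <;> omega

theorem pvHc_none (M m : Int) (s : List Int) :
    pvHc M m none none s =
      pvTW m M s - pvTW (m + 1) M s - pvTW m (M - 1) s + pvTW (m + 1) (M - 1) s := by
  cases s with
  | nil => simp [pvHc, pvTW]
  | cons x xs =>
    simp only [pvHc, pvTW]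
    rw [pvHc_J, pvJ_eq, pvJ_eq, pvJ_eq, pvJ_eq]
    split_ifs <;> omega

theorem pvSD_congr (h h' : List Int → Int) (H : ∀ s, h s = h' s) :
    ∀ (l : List Int), pvSD h l = pvSD h' l := by
  intro l
  induction l with
  | nil => simp [pvSD]
  | cons x xs ih => simp only [pvSD]; rw [H, ih]

theorem pvSD_combo (M m : Int) :
    ∀ (l : List Int),
    pvSD (fun s => pvTW m M s - pvTW (m + 1) M s - pvTW m (M - 1) s + pvTW (m + 1) (M - 1) s) l
      = pvSD (pvTW m M) l - pvSD (pvTW (m + 1) M) l - pvSD (pvTW m (M - 1)) l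
        + pvSD (pvTW (m + 1) (M - 1)) l := by
  intro l
  induction l with
  | nil => simp [pvSD]
  | cons x xs ih => simp only [pvSD]; rw [ih]; ring

-- A's outer loop sums g over the nonempty suffixes of l
theorem pv_outer (g : List Int → Int) (l : List Int) :
    ∀ (k : Nat) (i : Int) (c : Int), 0 ≤ i → (l.length : Int) - i = (k : Int) →
    (PySem.List.pyRange i (l.length : Int) 1).foldl (fun c j => c + g (l.drop j.toNat)) c
      = c + pvSD g (l.drop i.toNat) := by
  intro k
  induction k with
  | zero =>
    intro i c hi hk
    rw [PySem.List.pyRange_one_eq_nil (by omega)]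
    rw [List.drop_eq_nil_of_le (by omega)]
    simp [pvSD]
  | succ k ih =>
    intro i c hi hk
    have hilt : i < (l.length : Int) := by omega
    have hlen : i.toNat < l.length := by omega
    rw [PySem.List.pyRange_one_cons hilt, List.foldl_cons]
    rw [ih (i + 1) _ (by omega) (by omega)]
    rw [List.drop_eq_getElem_cons hlen]
    have h1 : (i + 1).toNat = i.toNat + 1 := by omega
    rw [h1]
    simp only [pvSD]
    ring

-- B's pass equals the suffix sum of pvTW
theorem pv_runCount_eq (n : Int) (price : List Int) (lo hi : Int)
    (hn : 0 ≤ n) (hlen : n ≤ (price.length : Int)) :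
    pvRunCount n price lo hi = pvSD (pvTW lo hi) (price.take n.toNat) := by
  unfold pvRunCount
  rw [pv_bridge (pvStepRun lo hi) price 0 n.toNat 0 n (0, 0) le_rfl (by omega) hlen]
  simp only [Int.toNat_zero, List.drop_zero]
  rw [pv_run_char, pvG_zero]
  ring

theorem pv_A_eq (n : Int) (price : List Int) (M m : Int)
    (hn : 0 ≤ n) (hlen : n ≤ (price.length : Int)) :
    count_investable_periods n price M m
      = pvSD (pvHc M m none none) (price.take n.toNat) := by
  unfold count_investable_periods
  have hl : ((price.take n.toNat).length : Int) = n := by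
    simp [List.length_take]; omega
  have hbody : ∀ (c : Int), ∀ i ∈ PySem.List.pyRange 0 n 1,
      ((PySem.List.pyRange i n 1).foldl
          (fun st j => pvStepA M m st (PySem.List.pyGetD price j 0))
          ((none, none, c) : Option Int × Option Int × Int)).2.2
        = c + pvHc M m none none ((price.take n.toNat).drop i.toNat) := by
    intro c i hi
    rw [PySem.List.mem_pyRange_one] at hi
    rw [pv_bridge (pvStepA M m) price 0 (n - i).toNat i n _ hi.1 (by omega) hlen]
    exact pv_inner_char M m _ none none c
  rw [PySem.List.foldl_congr_mem _ _ _ _ (fun c i hi => hbody c i hi)]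
  have := pv_outer (pvHc M m none none) (price.take n.toNat) n.toNat 0 0 le_rfl (by omega)
  rw [hl] at this
  simpa using this

-- ===== VERDICT (by name: the statement is the Claim_ definition above) =====
theorem count_investable_periods_spec : Claim_equal_count_investable_periods := by
  intro n price M m _ hpre
  unfold Spec_count_investable_periods
  unfold Pre_count_investable_periods at hpre
  by_cases hn : 0 ≤ n
  · rw [pv_A_eq n price M m hn hpre]
    unfold count_investable_periods_alt
    rw [pv_runCount_eq n price m M hn hpre,
        pv_runCount_eq n price (m + 1) M hn hpre,
        pv_runCount_eq n price m (M - 1) hn hpre,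
        pv_runCount_eq n price (m + 1) (M - 1) hn hpre]
    rw [pvSD_congr _ _ (pvHc_none M m)]
    exact pvSD_combo M m (price.take n.toNat)
  · unfold count_investable_periods count_investable_periods_alt pvRunCount
    rw [PySem.List.pyRange_one_eq_nil (by omega)]
    simp
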